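-- pv_equiv track=rewrite | github.com/TincyThomas/301-Days-of-Problem-Solving | Fix the Spacing.py | correct_spacing
-- ===== SOURCE A (Python) =====
-- def correct_spacing(sentence):
--     b = []
--     a = sentence.split(" ")
--     for i in a:
--         if i == "":
--             continue
--         else:
--             b = b + [i]
--     return " ".join(b)
-- ===== SOURCE B (Python) =====
-- def correct_spacing(sentence):
--     out = []
--     pending = False
--     for ch in sentence:
--         if ch == ' ':
--             if out:
--                 pending = True
--         else:
--             if pending:
--                 out.append(' ')
--                 pending = False
--             out.append(ch)
--     return ''.join(out)
-- ===== Notes on version B (the rewrite author's own statement) =====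
-- stated objective: alternative
-- what changed: Replaces split-on-space + filter + join with a single left-to-right character scan using a pending-space flag, never materialising tokens; trades A's C-level split/join for an explicit linear scan.
import Mathlib
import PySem

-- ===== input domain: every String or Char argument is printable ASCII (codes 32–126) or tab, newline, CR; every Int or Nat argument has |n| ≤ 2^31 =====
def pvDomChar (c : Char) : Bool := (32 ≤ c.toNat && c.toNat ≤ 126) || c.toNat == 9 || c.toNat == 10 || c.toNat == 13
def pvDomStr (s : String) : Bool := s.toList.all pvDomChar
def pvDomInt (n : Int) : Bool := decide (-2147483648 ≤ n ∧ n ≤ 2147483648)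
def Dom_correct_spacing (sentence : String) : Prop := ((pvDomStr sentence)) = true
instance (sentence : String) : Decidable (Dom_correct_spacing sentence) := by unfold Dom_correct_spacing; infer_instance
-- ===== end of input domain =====

-- B replaces A's split-on-" " + filter + join with one left-to-right character scan
-- using a pending-space flag (objective: alternative algorithm, same observable result).


-- ===== PORT A =====
-- a = sentence.split(" "); for i in a: if i == "": continue else: b = b + [i]; return " ".join(b)
def correct_spacing (sentence : String) : String :=
  let a := PySem.Chars.splitOn sentence.toList [' ']
  let b := a.foldl (fun b i => if i = [] then b else b ++ [i]) []
  String.ofList (PySem.Chars.join [' '] b)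

-- ===== PORT B =====
-- one scan; state = (out : chars emitted so far, pending : a space is owed before the next char)
def csStep (st : List Char × Bool) (ch : Char) : List Char × Bool :=
  if ch = ' ' then
    (if st.1.isEmpty then st else (st.1, true))
  else
    ((if st.2 then st.1 ++ [' '] else st.1) ++ [ch], false)

def correct_spacing_alt (sentence : String) : String :=
  String.ofList (sentence.toList.foldl csStep ([], false)).1

-- ===== PRECONDITION & SPEC =====
def Spec_correct_spacing (sentence : String) (out : String) : Prop := out = correct_spacing_alt sentence
instance (sentence : String) (out : String) : Decidable (Spec_correct_spacing sentence out) := by unfold Spec_correct_spacing; infer_instance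

-- ===== CLAIM (what is proved, stated in full; the proofs are below) =====
def Claim_equal_correct_spacing : Prop := ∀ (sentence : String), Dom_correct_spacing sentence → Spec_correct_spacing sentence (correct_spacing sentence)

-- ===== LEMMAS AND PROOFS =====

-- structural version of split(" "): spA l cur = tokens of l, with cur the reversed current token
def spA : List Char → List Char → List (List Char)
  | [], cur => [cur.reverse]
  | c :: t, cur => if c = ' ' then cur.reverse :: spA t [] else spA t (c :: cur)

-- semantic value of B's scan: e = "out is nonempty", p = pending flag
def resB : List Char → Bool → Bool → List Char
  | [], _, _ => []
  | c :: t, e, p =>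
    if c = ' ' then resB t e (p || e)
    else (if p then [' '] else []) ++ c :: resB t true false

lemma spA_go (l : List Char) : ∀ (fuel : Nat) (cur : List Char) (acc : List (List Char)),
    l.length < fuel →
    PySem.Chars.splitOn.go [' '] fuel l cur acc = acc.reverse ++ spA l cur := by
  induction l with
  | nil =>
    intro fuel cur acc h
    match fuel, h with
    | fuel + 1, _ => simp [PySem.Chars.splitOn.go, spA]
  | cons c t ih =>
    intro fuel cur acc h
    match fuel, h with
    | fuel + 1, h =>
      simp only [PySem.Chars.splitOn.go]
      by_cases hc : c = ' '
      · subst hc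
        rw [if_pos (by simp [List.isPrefixOf])]
        rw [show List.drop [' '].length (' ' :: t) = t from rfl]
        rw [ih fuel [] (cur.reverse :: acc) (by simpa using Nat.lt_of_succ_lt_succ h)]
        simp [spA]
      · rw [if_neg (by simp [List.isPrefixOf]; exact fun h => hc h.symm)]
        rw [ih fuel (c :: cur) acc (by exact Nat.lt_of_succ_lt_succ h)]
        simp [spA, hc]

lemma splitOn_eq_spA (l : List Char) : PySem.Chars.splitOn l [' '] = spA l [] := by
  have := spA_go l (l.length + 1) [] [] (Nat.lt_succ_self _)
  simpa [PySem.Chars.splitOn] using this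

lemma foldB (l : List Char) : ∀ (out : List Char) (p : Bool),
    (l.foldl csStep (out, p)).1 = out ++ resB l (!out.isEmpty) p := by
  induction l with
  | nil => intro out p; simp [resB]
  | cons c t ih =>
    intro out p
    by_cases hc : c = ' '
    · subst hc
      cases out with
      | nil => simp [csStep, resB, ih]
      | cons x xs => simp [csStep, resB, ih]
    · simp only [List.foldl_cons, csStep, if_neg hc]
      rw [ih]
      cases p <;> cases out <;> simp [resB, hc]

-- first token of spA l cur contains cur.reverse, so the filtered list is nonempty when cur ≠ []
lemma spA_filter_ne_nil (l : List Char) : ∀ cur : List Char, cur ≠ [] →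
    (spA l cur).filter (fun t => !t.isEmpty) ≠ [] := by
  induction l with
  | nil =>
    intro cur hcur
    simp [spA, List.filter, hcur]
  | cons c t ih =>
    intro cur hcur
    by_cases hc : c = ' '
    · subst hc; simp [spA, hcur]
    · simp only [spA, if_neg hc]
      exact ih (c :: cur) (by simp)

lemma spA_space (t : List Char) (cur : List Char) : spA (' ' :: t) cur = cur.reverse :: spA t [] := by
  simp [spA]

lemma spA_char {c : Char} (hc : c ≠ ' ') (t cur : List Char) : spA (c :: t) cur = spA t (c :: cur) := by
  simp [spA, hc]

lemma resB_space (t : List Char) (e p : Bool) : resB (' ' :: t) e p = resB t e (p || e) := by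
  simp [resB]

lemma resB_char {c : Char} (hc : c ≠ ' ') (t : List Char) (e p : Bool) :
    resB (c :: t) e p = (if p then [' '] else []) ++ c :: resB t true false := by
  simp [resB, hc]

-- joint characterisation: pending state vs mid-token state
lemma resB_spA (l : List Char) :
    (resB l true true =
      if (spA l []).filter (fun t => !t.isEmpty) = [] then []
      else ' ' :: PySem.Chars.join [' '] ((spA l []).filter (fun t => !t.isEmpty)))
    ∧ (∀ cur : List Char, cur ≠ [] →
      cur.reverse ++ resB l true false =
        PySem.Chars.join [' '] ((spA l cur).filter (fun t => !t.isEmpty))) := by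
  induction l with
  | nil =>
    constructor
    · simp [resB, spA, List.filter]
    · intro cur hcur
      simp [resB, spA, List.filter, hcur, PySem.Chars.join_singleton]
  | cons c t ih =>
    obtain ⟨ih2, ih3⟩ := ih
    by_cases hc : c = ' '
    · subst hc
      constructor
      · simpa [resB_space, spA_space, List.filter] using ih2
      · intro cur hcur
        rw [spA_space, resB_space]
        simp only [Bool.false_or]
        have hce : cur.reverse.isEmpty = false := by
          cases cur with
          | nil => exact absurd rfl hcur
          | cons x xs => simp
        have hkeep : ((cur.reverse :: spA t []).filter (fun t => !t.isEmpty))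
            = cur.reverse :: (spA t []).filter (fun t => !t.isEmpty) := by
          simp [List.filter, hce]
        rw [hkeep]
        by_cases hnil : (spA t []).filter (fun t => !t.isEmpty) = []
        · rw [hnil, ih2, if_pos hnil]
          simp [PySem.Chars.join_singleton]
        · obtain ⟨q, rest, hqr⟩ : ∃ q rest, (spA t []).filter (fun t => !t.isEmpty) = q :: rest := by
            cases h : (spA t []).filter (fun t => !t.isEmpty) with
            | nil => exact absurd h hnil
            | cons q rest => exact ⟨q, rest, rfl⟩
          rw [ih2, if_neg hnil, hqr, PySem.Chars.join_cons_cons]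
          simp
    · constructor
      · rw [resB_char hc, spA_char hc]
        rw [if_neg (spA_filter_ne_nil t [c] (by simp))]
        have := ih3 [c] (by simp)
        simp only [List.reverse_cons, List.reverse_nil, List.nil_append, List.singleton_append] at this
        simp [← this]
      · intro cur hcur
        rw [resB_char hc, spA_char hc]
        have := ih3 (c :: cur) (by simp)
        simpa using this

lemma resB_main (l : List Char) :
    resB l false false = PySem.Chars.join [' '] ((spA l []).filter (fun t => !t.isEmpty)) := by
  induction l with
  | nil => simp [resB, spA, List.filter]
  | cons c t ih =>
    by_cases hc : c = ' '
    · subst hc; simpa [resB_space, spA_space, List.filter] using ih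
    · rw [resB_char hc, spA_char hc]
      have := (resB_spA t).2 [c] (by simp)
      simp only [List.reverse_cons, List.reverse_nil, List.nil_append, List.singleton_append] at this
      simp [← this]

lemma foldA_eq_filter (a : List (List Char)) :
    a.foldl (fun b i => if i = [] then b else b ++ [i]) ([] : List (List Char))
      = a.filter (fun t => !t.isEmpty) := by
  have hfun : (fun (b : List (List Char)) (i : List Char) => if i = [] then b else b ++ [i])
      = fun b i => if i ≠ [] then b ++ [i] else b := by
    funext b i; by_cases h : i = [] <;> simp [h]
  rw [hfun, PySem.List.foldl_append_ite_eq_filter (fun i => i ≠ [])]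
  simp only [List.nil_append]
  congr 1
  funext t
  cases t <;> simp

-- ===== VERDICT (by name: the statement is the Claim_ definition above) =====
theorem correct_spacing_spec : Claim_equal_correct_spacing := by
  intro sentence _
  show correct_spacing sentence = correct_spacing_alt sentence
  unfold correct_spacing correct_spacing_alt
  rw [foldB sentence.toList [] false]
  simp only [List.isEmpty_nil, Bool.not_true, List.nil_append]
  rw [splitOn_eq_spA, foldA_eq_filter, resB_main]
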